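-- pv_equiv track=rewrite | github.com/ymtz13/CompetitiveProgramming | AtCoder/ABC137/F.py | solve
-- ===== SOURCE A (Python) =====
-- def solve(P, A):
--     A0 = A[0]
--     C = [a - A0 for a in A[1:]]
--
--     B = [A0]
--
--     for n in range(1, P):
--         s = 0
--         for m, c in enumerate(C, 1):
--             s += c * pow(m, n * (P - 2), P)
--             s %= P
--
--         B.append(s * (P - 1) % P)
--
--     return B
-- ===== SOURCE B (Python) =====
-- def solve(P, A):
--     A0 = A[0]
--     if P < 2:
--         return [A0]
--     B = [0] * (P - 1)
--     for m, a in enumerate(A[1:], 1):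
--         c = a - A0
--         inv = pow(m, P - 2, P)
--         p = 1
--         col = []
--         for _ in range(P - 1):
--             p = p * inv % P
--             col.append(p)
--         B = [(b + c * p) % P for b, p in zip(B, col)]
--     return [A0] + [b * (P - 1) % P for b in B]
-- ===== Notes on version B (the rewrite author's own statement) =====
-- stated objective: faster
-- what changed: Transposed the loop nest: m is the outer loop with a per-column running power (one modular multiply per cell) scattered into a partial-sum array, instead of a fresh modular exponentiation pow(m, n*(P-2), P) inside a per-n inner scan.
import Mathlib
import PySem

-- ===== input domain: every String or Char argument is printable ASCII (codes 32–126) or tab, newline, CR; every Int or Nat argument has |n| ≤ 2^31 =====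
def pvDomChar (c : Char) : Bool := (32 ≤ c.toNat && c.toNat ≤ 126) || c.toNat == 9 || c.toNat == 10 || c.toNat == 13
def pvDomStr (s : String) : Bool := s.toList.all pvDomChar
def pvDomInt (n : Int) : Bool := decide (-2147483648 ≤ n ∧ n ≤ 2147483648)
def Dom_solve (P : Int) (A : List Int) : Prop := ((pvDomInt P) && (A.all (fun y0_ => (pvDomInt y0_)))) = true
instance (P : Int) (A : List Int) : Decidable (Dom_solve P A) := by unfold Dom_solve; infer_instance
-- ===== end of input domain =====

-- B transposes A's loop nest: m outer with a running power per column (one modular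
-- multiply per cell instead of a fresh modular exponentiation), scattering into an
-- output array; same O(P·|A|) cell count with a cheaper per-cell operation.

-- ===== PORT A =====
def solveInner (P : Int) (C : List Int) (n : Int) : Int :=
  (PySem.List.enumerate C 1).foldl
    (fun s mc => PySem.Int.mod (s + mc.2 * PySem.Int.powMod mc.1 ((n * (P - 2)).toNat) P) P) 0

def solve (P : Int) (A : List Int) : List Int :=
  let A0 := (PySem.List.pyGet? A 0).getD 0
  let C := (PySem.List.slice A (some 1) none).map (fun a => a - A0)
  (PySem.List.pyRange 1 P 1).foldl
    (fun B n => B ++ [PySem.Int.mod (solveInner P C n * (P - 1)) P]) [A0]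

-- ===== PORT B =====
-- the inner n-loop of Source B: running power p, reduced mod P each step, collected in a list
def pvColumn (P inv : Int) : List Int :=
  ((PySem.List.pyRange 0 (P - 1) 1).foldl
    (fun (acc : List Int × Int) _ =>
      let p := PySem.Int.mod (acc.2 * inv) P
      (acc.1 ++ [p], p)) ([], 1)).1

def solve_alt (P : Int) (A : List Int) : List Int :=
  let A0 := (PySem.List.pyGet? A 0).getD 0
  if P < 2 then [A0]
  else
    let B0 : List Int := List.replicate (P - 1).toNat 0
    let B := (PySem.List.enumerate (PySem.List.slice A (some 1) none) 1).foldl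
      (fun B ma =>
        let c := ma.2 - A0
        let inv := PySem.Int.powMod ma.1 (P - 2).toNat P
        (B.zip (pvColumn P inv)).map (fun bp => PySem.Int.mod (bp.1 + c * bp.2) P)) B0
    A0 :: B.map (fun b => PySem.Int.mod (b * (P - 1)) P)

-- ===== PRECONDITION & SPEC =====
-- Pre_ excludes only the empty list, on which Python A raises IndexError (A[0]).
def Pre_solve (P : Int) (A : List Int) : Prop := A ≠ []
instance (P : Int) (A : List Int) : Decidable (Pre_solve P A) := by unfold Pre_solve; infer_instance
def pvWitness_solve : Int × List Int := (5, [1, 2, 4])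

def Spec_solve (P : Int) (A : List Int) (out : List Int) : Prop := out = solve_alt P A
instance (P : Int) (A : List Int) (out : List Int) : Decidable (Spec_solve P A out) := by unfold Spec_solve; infer_instance

-- ===== CLAIM (what is proved, stated in full; the proofs are below) =====
def Claim_equal_solve : Prop := ∀ (P : Int) (A : List Int), Dom_solve P A → Pre_solve P A → Spec_solve P A (solve P A)

-- ===== LEMMAS AND PROOFS =====

-- the common closed form: entry k (0-based, output index k+1) of the tail of the result
def pvSum (P A0 : Int) (L : List (Int × Int)) (k : Nat) : Int :=
  (L.map (fun ma => (ma.2 - A0) * (ma.1 ^ ((k + 1) * (P - 2).toNat) % P))).sum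

theorem pv_mul_mod_absorb (P x y : Int) : x % P * y % P = x * y % P := by
  rw [Int.mul_emod, Int.emod_emod_of_dvd _ dvd_rfl, ← Int.mul_emod]

theorem pv_pow_emod (a : Int) (n : Nat) (m : Int) : (a % m) ^ n % m = a ^ n % m := by
  induction n with
  | zero => simp
  | succ k ih =>
    rw [pow_succ, pow_succ, Int.mul_emod, ih, pv_mul_mod_absorb,
      Int.emod_emod_of_dvd _ dvd_rfl, mul_comm (a ^ k) (a % m), pv_mul_mod_absorb,
      mul_comm a (a ^ k)]

theorem pv_mod_absorb (P x y : Int) : (x % P + y) % P = (x + y) % P := by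
  rw [Int.add_emod, Int.emod_emod_of_dvd _ dvd_rfl, ← Int.add_emod]

-- A's inner loop with running reduction computes the reduced sum
theorem pv_inner_foldl (P : Int) (g : Int × Int → Int) (L : List (Int × Int)) (x : Int) :
    L.foldl (fun s mc => (s + g mc) % P) (x % P) = (x + (L.map g).sum) % P := by
  induction L generalizing x with
  | nil => simp
  | cons mc L ih =>
    simp only [List.foldl_cons, List.map_cons, List.sum_cons]
    rw [pv_mod_absorb, ih, add_assoc]

-- enumerate of a mapped list
theorem pv_enumerate_map {α β : Type} (f : α → β) (l : List α) (s : Int) :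
    PySem.List.enumerate (l.map f) s
      = (PySem.List.enumerate l s).map (fun p => (p.1, f p.2)) := by
  induction l generalizing s with
  | nil => rfl
  | cons a l ih => simp [PySem.List.enumerate, ih]

-- the column loop of B produces the reduced powers of inv
theorem pv_col_foldl (P inv : Int) (l : List Int) (acc : List Int) (p : Int)
    (hp : p % P = p) :
    l.foldl (fun (ac : List Int × Int) _ =>
        (ac.1 ++ [(ac.2 * inv) % P], (ac.2 * inv) % P)) (acc, p)
      = (acc ++ (List.range l.length).map (fun k => p * inv ^ (k + 1) % P),
         p * inv ^ l.length % P) := by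
  induction l generalizing acc p with
  | nil => simp [hp]
  | cons a l ih =>
    simp only [List.foldl_cons, List.length_cons]
    rw [ih _ _ (Int.emod_emod_of_dvd _ dvd_rfl), Prod.mk.injEq]
    refine ⟨?_, ?_⟩
    · rw [List.append_assoc, List.range_succ_eq_map]
      simp only [List.map_cons, List.map_map, List.singleton_append]
      simp only [zero_add, pow_one]
      refine congrArg (fun t => acc ++ p * inv % P :: t) ?_
      apply List.map_congr_left
      intro k _
      simp only [Function.comp, Nat.succ_eq_add_one]
      rw [pv_mul_mod_absorb, mul_assoc, ← pow_succ']
    · rw [pv_mul_mod_absorb, mul_assoc, ← pow_succ']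

theorem pv_column_eq (P inv : Int) (hP : 2 ≤ P) :
    pvColumn P inv = (List.range (P - 1).toNat).map (fun k => inv ^ (k + 1) % P) := by
  unfold pvColumn
  have hmod : ∀ a : Int, PySem.Int.mod a P = a % P := fun a =>
    PySem.Int.mod_eq_emod_of_pos (by omega)
  simp only [hmod]
  rw [show (fun (acc : List Int × Int) (_ : Int) =>
      ((acc.1 ++ [acc.2 * inv % P], acc.2 * inv % P) : List Int × Int))
    = (fun (ac : List Int × Int) _ => (ac.1 ++ [(ac.2 * inv) % P], (ac.2 * inv) % P)) from rfl]
  rw [pv_col_foldl P inv _ _ _ (Int.emod_eq_of_lt (by omega) (by omega))]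
  simp [PySem.List.length_pyRange_one, one_mul]

-- B's outer loop maintains the reduced partial sums pointwise
theorem pv_scatter_foldl (P A0 : Int) (hP : 2 ≤ P) (L : List (Int × Int)) (g : Nat → Int) :
    L.foldl (fun B ma =>
        (B.zip (pvColumn P (PySem.Int.powMod ma.1 (P - 2).toNat P))).map
          (fun bp => PySem.Int.mod (bp.1 + (ma.2 - A0) * bp.2) P))
      ((List.range (P - 1).toNat).map (fun k => g k % P))
    = (List.range (P - 1).toNat).map (fun k => (g k + pvSum P A0 L k) % P) := by
  induction L generalizing g with
  | nil => simp [pvSum]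
  | cons ma L ih =>
    have hmod : ∀ a : Int, PySem.Int.mod a P = a % P := fun a =>
      PySem.Int.mod_eq_emod_of_pos (by omega)
    simp only [List.foldl_cons]
    rw [pv_column_eq _ _ hP, List.zip_map', List.map_map]
    have hstep : ((fun bp : Int × Int => PySem.Int.mod (bp.1 + (ma.2 - A0) * bp.2) P) ∘
        fun k => (g k % P, PySem.Int.powMod ma.1 (P - 2).toNat P ^ (k + 1) % P))
        = fun k => ((g k + (ma.2 - A0) * (ma.1 ^ ((k + 1) * (P - 2).toNat) % P)) % P) := by
      funext k
      simp only [Function.comp, PySem.Int.powMod, hmod]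
      have hpow : (ma.1 ^ (P - 2).toNat % P) ^ (k + 1) % P
          = ma.1 ^ ((k + 1) * (P - 2).toNat) % P := by
        rw [pv_pow_emod, ← pow_mul, Nat.mul_comm]
      rw [hpow, pv_mod_absorb]
    rw [hstep]
    have := ih (fun k => g k + (ma.2 - A0) * (ma.1 ^ ((k + 1) * (P - 2).toNat) % P))
    rw [show (List.range (P - 1).toNat).map
        (fun k => (g k + (ma.2 - A0) * (ma.1 ^ ((k + 1) * (P - 2).toNat) % P)) % P)
      = (List.range (P - 1).toNat).map
        (fun k => (fun k => g k + (ma.2 - A0) * (ma.1 ^ ((k + 1) * (P - 2).toNat) % P)) k % P)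
      from rfl, this]
    apply List.map_congr_left
    intro k _
    simp [pvSum, add_assoc]

-- A's result in closed form (P ≥ 2)
theorem pv_solve_eq (P : Int) (A : List Int) (hP : 2 ≤ P) :
    solve P A = ((PySem.List.pyGet? A 0).getD 0) ::
      (List.range (P - 1).toNat).map (fun k =>
        (pvSum P ((PySem.List.pyGet? A 0).getD 0) (PySem.List.enumerate A.tail 1) k % P
          * (P - 1)) % P) := by
  unfold solve
  set A0 := (PySem.List.pyGet? A 0).getD 0 with hA0
  rw [PySem.List.pyRange_one, List.foldl_map, PySem.List.foldl_append_singleton_eq_map]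
  simp only [List.singleton_append]
  congr 1
  apply List.map_congr_left
  intro k _
  have hmod : ∀ a : Int, PySem.Int.mod a P = a % P := fun a =>
    PySem.Int.mod_eq_emod_of_pos (by omega)
  -- solveInner P C (1+k) = pvSum … % P
  unfold solveInner
  rw [PySem.List.slice_from_one, pv_enumerate_map]
  simp only [hmod]
  have h0 : (0 : Int) = 0 % P := by
    rw [Int.zero_emod]
  rw [h0, List.foldl_map, pv_inner_foldl, zero_add]
  unfold pvSum
  have he : ((1 + (k : Int)) * (P - 2)).toNat = (k + 1) * (P - 2).toNat := by
    have h2 : (0 : Int) ≤ P - 2 := by omega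
    have h3 : (1 + (k : Int)) * (P - 2) = ((k + 1) * (P - 2).toNat : Nat) := by
      push_cast [Int.toNat_of_nonneg h2]
      ring
    rw [h3, Int.toNat_natCast]
  congr 2
  have hmap := List.map_congr_left (l := PySem.List.enumerate A.tail 1)
    (f := fun y : Int × Int =>
      (y.1, y.2 - A0).2 * PySem.Int.powMod (y.1, y.2 - A0).1 ((1 + (k : Int)) * (P - 2)).toNat P)
    (g := fun ma : Int × Int => (ma.2 - A0) * (ma.1 ^ ((k + 1) * (P - 2).toNat) % P))
    (by intro ma _; simp only [PySem.Int.powMod, hmod, he])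
  rw [hmap]

-- B's result in closed form (P ≥ 2)
theorem pv_solve_alt_eq (P : Int) (A : List Int) (hP : 2 ≤ P) :
    solve_alt P A = ((PySem.List.pyGet? A 0).getD 0) ::
      (List.range (P - 1).toNat).map (fun k =>
        (pvSum P ((PySem.List.pyGet? A 0).getD 0) (PySem.List.enumerate A.tail 1) k % P
          * (P - 1)) % P) := by
  unfold solve_alt
  set A0 := (PySem.List.pyGet? A 0).getD 0 with hA0
  rw [if_neg (by omega)]
  simp only
  rw [PySem.List.slice_from_one]
  have hB0 : (List.replicate (P - 1).toNat (0 : Int))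
      = (List.range (P - 1).toNat).map (fun k => (fun _ : Nat => (0 : Int)) k % P) := by
    simp [List.map_const']
  rw [hB0, pv_scatter_foldl P A0 hP]
  have hmod : ∀ a : Int, PySem.Int.mod a P = a % P := fun a =>
    PySem.Int.mod_eq_emod_of_pos (by omega)
  congr 1
  rw [List.map_map]
  apply List.map_congr_left
  intro k _
  simp only [Function.comp, hmod, zero_add]

-- ===== VERDICT (by name: the statement is the Claim_ definition above) =====
theorem solve_spec : Claim_equal_solve := by
  intro P A _ _
  unfold Spec_solve
  rcases lt_or_ge P 2 with hP | hP
  · unfold solve solve_alt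
    rw [if_pos hP]
    simp only
    have : PySem.List.pyRange 1 P 1 = [] := by
      rw [PySem.List.pyRange_one]
      have : (P - 1).toNat = 0 := by omega
      rw [this]; rfl
    rw [this]; rfl
  · rw [pv_solve_eq P A hP, pv_solve_alt_eq P A hP]
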